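-- pv_equiv track=rewrite | github.com/srv1n/editops-skills | skills/video-clipper/scripts/clip_director.py | _extract_title_text
-- ===== SOURCE A (Python) =====
-- from typing import Any, Dict, Iterable, List, Optional, Sequence, Tuple
--
-- def _extract_title_text(tokens: Sequence[str]) -> Optional[str]:
--     """
--     Best-effort listicle title extraction.
--
--     Examples:
--       "here are ten rules ..." -> "10 RULES"
--       "here are 5 things ..." -> "5 THINGS"
--     """
--     window = [t for t in tokens[:12] if t]
--     if not window:
--         return None
--
--     number_words = {
--         "one": 1,
--         "two": 2,
--         "three": 3,
--         "four": 4,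
--         "five": 5,
--         "six": 6,
--         "seven": 7,
--         "eight": 8,
--         "nine": 9,
--         "ten": 10,
--         "eleven": 11,
--         "twelve": 12,
--         "thirteen": 13,
--         "fourteen": 14,
--         "fifteen": 15,
--         "sixteen": 16,
--         "seventeen": 17,
--         "eighteen": 18,
--         "nineteen": 19,
--         "twenty": 20,
--     }
--     nouns = {
--         "rules",
--         "ways",
--         "tips",
--         "things",
--         "reasons",
--         "lessons",
--         "principles",
--         "steps",
--         "facts",
--         "signs",
--     }
--
--     def parse_n(tok: str) -> Optional[int]:
--         if not tok:
--             return None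
--         if tok.isdigit():
--             try:
--                 v = int(tok)
--                 if 1 <= v <= 99:
--                     return v
--             except Exception:
--                 return None
--         return number_words.get(tok)
--
--     for i, tok in enumerate(window):
--         n = parse_n(tok)
--         if n is None:
--             continue
--         for j in range(i + 1, min(len(window), i + 5)):
--             noun = window[j]
--             if noun in nouns:
--                 return f"{n} {noun.upper()}"
--     return None
-- ===== SOURCE B (Python) =====
-- from collections import deque
-- from typing import Optional, Sequence
--
--
-- def _extract_title_text(tokens: Sequence[str]) -> Optional[str]:
--     """Single left-to-right pass keeping a sliding deque of the number
--     tokens seen in the last 4 positions; returns at the first noun that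
--     has such a number before it."""
--     window = [t for t in tokens[:12] if t]
--
--     number_words = {
--         "one": 1, "two": 2, "three": 3, "four": 4, "five": 5,
--         "six": 6, "seven": 7, "eight": 8, "nine": 9, "ten": 10,
--         "eleven": 11, "twelve": 12, "thirteen": 13, "fourteen": 14,
--         "fifteen": 15, "sixteen": 16, "seventeen": 17, "eighteen": 18,
--         "nineteen": 19, "twenty": 20,
--     }
--     nouns = {
--         "rules", "ways", "tips", "things", "reasons",
--         "lessons", "principles", "steps", "facts", "signs",
--     }
--
--     def parse_n(tok: str) -> Optional[int]:
--         if not tok: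
--             return None
--         if tok.isdigit():
--             try:
--                 v = int(tok)
--                 if 1 <= v <= 99:
--                     return v
--             except Exception:
--                 return None
--         return number_words.get(tok)
--
--     recent = deque()  # (index, value) of number tokens, indices ascending
--     for j, tok in enumerate(window):
--         while recent and recent[0][0] < j - 4:
--             recent.popleft()
--         if tok in nouns and recent:
--             return f"{recent[0][1]} {tok.upper()}"
--         n = parse_n(tok)
--         if n is not None:
--             recent.append((j, n))
--     return None
-- ===== Notes on version B (the rewrite author's own statement) =====
-- stated objective: alternative
-- what changed: Replaces the nested scan (for each number token, look ahead up to 4 positions for a noun) by a single left-to-right pass that maintains a sliding deque of the number tokens seen in the last 4 positions and returns at the first noun with such a number before it.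
import Mathlib
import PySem

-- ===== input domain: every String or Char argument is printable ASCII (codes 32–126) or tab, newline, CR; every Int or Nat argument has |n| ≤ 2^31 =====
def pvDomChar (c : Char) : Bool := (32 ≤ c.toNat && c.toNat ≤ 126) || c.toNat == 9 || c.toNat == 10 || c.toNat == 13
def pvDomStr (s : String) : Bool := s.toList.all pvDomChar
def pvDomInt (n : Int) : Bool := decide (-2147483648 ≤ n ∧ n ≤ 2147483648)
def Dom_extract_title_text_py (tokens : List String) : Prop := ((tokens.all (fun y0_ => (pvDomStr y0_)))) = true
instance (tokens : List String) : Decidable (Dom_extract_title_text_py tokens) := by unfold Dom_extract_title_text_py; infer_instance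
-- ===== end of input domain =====

-- B replaces A's nested look-ahead scan by one left-to-right pass with a sliding deque of
-- recent number tokens (alternative decomposition; same return value, proven equal below).

-- ===== PORT A =====
-- helpers shared verbatim by both Pythons: the number-word dict, the noun set, and parse_n
def pvNumberWords : PySem.Dict String Int := PySem.Dict.ofList
  [("one", 1), ("two", 2), ("three", 3), ("four", 4), ("five", 5), ("six", 6), ("seven", 7),
   ("eight", 8), ("nine", 9), ("ten", 10), ("eleven", 11), ("twelve", 12), ("thirteen", 13),
   ("fourteen", 14), ("fifteen", 15), ("sixteen", 16), ("seventeen", 17), ("eighteen", 18),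
   ("nineteen", 19), ("twenty", 20)]

def pvNouns : PySem.Set String := PySem.Set.ofList
  ["rules", "ways", "tips", "things", "reasons", "lessons", "principles", "steps", "facts", "signs"]

def pvParseN (tok : String) : Option Int :=
  if tok = "" then none
  else if PySem.Str.strIsdigit tok then
    match PySem.Int.ofStr? tok with
    | none => none                 -- Python's 'except: return None' (unreachable when isdigit)
    | some v => if 1 ≤ v ∧ v ≤ 99 then some v else PySem.Dict.get? pvNumberWords tok
  else PySem.Dict.get? pvNumberWords tok

-- inner 'for j in range(i+1, min(len(window), i+5))' loop; window[j] is always in range,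
-- the 'none' arm of pyGet? is unreachable
def pvAInner (window : List String) (n : Int) : List Int → Option String
  | [] => none
  | j :: js =>
    match PySem.List.pyGet? window j with
    | none => none
    | some noun =>
      if PySem.Set.contains pvNouns noun then
        some (PySem.Int.toStr n ++ " " ++ PySem.Str.upper noun)
      else pvAInner window n js

-- outer 'for i, tok in enumerate(window)' loop
def pvAOuter (window : List String) : List (Int × String) → Option String
  | [] => none
  | (i, tok) :: rest =>
    match pvParseN tok with
    | none => pvAOuter window rest
    | some n =>
      match pvAInner window n (PySem.List.pyRange (i + 1) (min (window.length : Int) (i + 5)) 1) with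
      | some s => some s
      | none => pvAOuter window rest

def extract_title_text_py (tokens : List String) : Option String :=
  let window := (PySem.List.slice tokens none (some 12)).filter (fun t => !(t == ""))
  if window = [] then none
  else pvAOuter window (PySem.List.enumerate window 0)

-- ===== PORT B =====
-- single pass; 'recent' is the deque of (index, value) of number tokens of the last 4 positions
def pvBLoop : List (Int × String) → List (Int × Int) → Option String
  | [], _ => none
  | (j, tok) :: rest, recent0 =>
    let recent := recent0.dropWhile (fun p => p.1 < j - 4)   -- 'while recent and recent[0][0] < j - 4: recent.popleft()'
    if PySem.Set.contains pvNouns tok && !recent.isEmpty then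
      some (PySem.Int.toStr recent.headI.2 ++ " " ++ PySem.Str.upper tok)
    else
      match pvParseN tok with
      | some n => pvBLoop rest (recent ++ [(j, n)])
      | none => pvBLoop rest recent

def extract_title_text_py_alt (tokens : List String) : Option String :=
  let window := (PySem.List.slice tokens none (some 12)).filter (fun t => !(t == ""))
  pvBLoop (PySem.List.enumerate window 0) []

-- ===== PRECONDITION & SPEC =====
def Spec_extract_title_text_py (tokens : List String) (out : Option String) : Prop := out = extract_title_text_py_alt tokens
instance (tokens : List String) (out : Option String) : Decidable (Spec_extract_title_text_py tokens out) := by unfold Spec_extract_title_text_py; infer_instance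

-- ===== CLAIM (what is proved, stated in full; the proofs are below) =====
def Claim_equal_extract_title_text_py : Prop := ∀ (tokens : List String), Dom_extract_title_text_py tokens → Spec_extract_title_text_py tokens (extract_title_text_py tokens)

-- ===== LEMMAS AND PROOFS =====

-- abstract view of the window: number value / noun test at an index, and the output string
def pvOut (n : Int) (t : String) : String := PySem.Int.toStr n ++ " " ++ PySem.Str.upper t
def pvNumAt (w : List String) (i : Nat) : Option Int := w[i]?.bind pvParseN
def pvNounAt (w : List String) (j : Nat) : Bool := (w[j]?.map (fun t => PySem.Set.contains pvNouns t)).getD false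
def pvNums (w : List String) (a b : Nat) : List (Nat × Int) :=
  (List.range' a (b - a)).filterMap (fun i => (pvNumAt w i).map (fun v => (i, v)))
def pvQ (w : List String) (j : Nat) : Bool := pvNounAt w j && !(pvNums w (j - 4) j).isEmpty
def pvNounRange (w : List String) (i : Nat) : List Nat := List.range' (i + 1) (min w.length (i + 5) - (i + 1))
def pvP (w : List String) (i : Nat) : Bool := (pvNumAt w i).isSome && (pvNounRange w i).any (pvNounAt w)
def pvCast (p : Nat × Int) : Int × Int := ((p.1 : Int), p.2)

def pvSpecA (w : List String) (s : Nat) : Option String :=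
  ((List.range' s (w.length - s)).find? (pvP w)).bind (fun i =>
    (pvNumAt w i).bind (fun n => ((pvNounRange w i).find? (pvNounAt w)).map (fun j => pvOut n (w.getD j ""))))

def pvSpecB (w : List String) (s : Nat) : Option String :=
  ((List.range' s (w.length - s)).find? (pvQ w)).bind (fun j =>
    ((pvNums w (j - 4) j).head?).map (fun p => pvOut p.2 (w.getD j "")))

lemma pv_nounAt_lt (w : List String) (j : Nat) (h : pvNounAt w j = true) : j < w.length := by
  by_contra hj
  rw [pvNounAt, List.getElem?_eq_none (by omega)] at h
  simp at h

lemma pv_head?_filterMap {α β : Type} (f : α → Option β) (l : List α) :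
    (l.filterMap f).head? = (l.find? (fun i => (f i).isSome)).bind f := by
  induction l with
  | nil => rfl
  | cons x xs ih =>
    rw [List.filterMap_cons, List.find?_cons]
    cases hx : f x with
    | none => simpa [hx] using ih
    | some b => simp [hx]

lemma pv_find?_range' (p : Nat → Bool) :
    ∀ (n s a : Nat), (List.range' s n).find? p = some a →
      s ≤ a ∧ a < s + n ∧ p a = true ∧ ∀ b, s ≤ b → b < a → p b = false := by
  intro n
  induction n with
  | zero => intro s a h; simp at h
  | succ n ih =>
    intro s a h
    rw [List.range'_succ, List.find?_cons] at h
    by_cases hs : p s = true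
    · rw [hs] at h
      obtain rfl : s = a := by simpa using h
      exact ⟨le_refl _, by omega, hs, fun b hb1 hb2 => by omega⟩
    · rw [Bool.not_eq_true] at hs; rw [hs] at h
      obtain ⟨h1, h2, h3, h4⟩ := ih (s + 1) a h
      refine ⟨by omega, by omega, h3, fun b hb1 hb2 => ?_⟩
      rcases Nat.eq_or_lt_of_le hb1 with rfl | hlt
      · simpa using hs
      · exact h4 b hlt hb2

lemma pv_inner (w : List String) (n : Int) (js : List Nat) (hjs : ∀ j ∈ js, j < w.length) :
    pvAInner w n (js.map (fun j => Int.ofNat j)) = (js.find? (pvNounAt w)).map (fun j => pvOut n (w.getD j "")) := by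
  induction js with
  | nil => rfl
  | cons j js ih =>
    have hj : j < w.length := hjs j (by simp)
    have hget : PySem.List.pyGet? w (Int.ofNat j) = some w[j] := by
      simp [Int.ofNat_eq_natCast, PySem.List.pyGet?_natCast, List.getElem?_eq_getElem hj]
    have hnoun : PySem.Set.contains pvNouns w[j] = pvNounAt w j := by
      simp [pvNounAt, List.getElem?_eq_getElem hj]
    rw [List.map_cons, pvAInner, hget]
    cases hN : pvNounAt w j with
    | true =>
      have hc : w[j] ∈ pvNouns := by
        have := hnoun.trans hN; simpa [PySem.Set.contains] using this
      simp [hc, hN, pvOut, List.getD_eq_getElem?_getD, List.getElem?_eq_getElem hj]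
    | false =>
      have hc : w[j] ∉ pvNouns := by
        have := hnoun.trans hN; simpa [PySem.Set.contains] using this
      rw [List.find?_cons]
      have ih' := ih (fun x hx => hjs x (by simp [hx]))
      simp only [Int.ofNat_eq_natCast] at ih'
      simp [hc, hN, ih', List.getD_eq_getElem?_getD]

lemma pv_range_cast (w : List String) (i : Nat) :
    PySem.List.pyRange ((i : Int) + 1) (min (w.length : Int) ((i : Int) + 5)) 1
      = (pvNounRange w i).map (fun j => Int.ofNat j) := by
  have hmin : min (w.length : Int) ((i : Int) + 5) = ((min w.length (i + 5) : Nat) : Int) := by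
    rw [Nat.cast_min]; push_cast; rfl
  rw [hmin, PySem.List.pyRange_one, pvNounRange, List.range'_eq_map_range, List.map_map]
  have hlen : (((min w.length (i + 5) : Nat) : Int) - ((i : Int) + 1)).toNat
      = min w.length (i + 5) - (i + 1) := by omega
  rw [hlen]
  refine List.map_congr_left fun k _ => ?_
  simp

lemma pv_specA_step (w : List String) (s : Nat) (h : pvP w s = false) : pvSpecA w s = pvSpecA w (s + 1) := by
  by_cases hs : s < w.length
  · have hn : w.length - s = (w.length - (s + 1)) + 1 := by omega
    rw [pvSpecA, pvSpecA, hn, List.range'_succ, List.find?_cons, h]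
  · have h1 : w.length - s = 0 := by omega
    have h2 : w.length - (s + 1) = 0 := by omega
    rw [pvSpecA, pvSpecA, h1, h2]; simp

lemma pv_specB_step (w : List String) (s : Nat) (h : pvQ w s = false) : pvSpecB w s = pvSpecB w (s + 1) := by
  by_cases hs : s < w.length
  · have hn : w.length - s = (w.length - (s + 1)) + 1 := by omega
    rw [pvSpecB, pvSpecB, hn, List.range'_succ, List.find?_cons, h]
  · have h1 : w.length - s = 0 := by omega
    have h2 : w.length - (s + 1) = 0 := by omega
    rw [pvSpecB, pvSpecB, h1, h2]; simp

lemma pv_nums_snoc (w : List String) (a b : Nat) (h : a ≤ b) :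
    pvNums w a (b + 1) = pvNums w a b ++ (pvNumAt w b).elim [] (fun v => [(b, v)]) := by
  have hn : b + 1 - a = (b - a) + 1 := by omega
  have hb : a + (b - a) = b := by omega
  rw [pvNums, pvNums, hn, List.range'_1_concat, hb, List.filterMap_append]
  cases hnb : pvNumAt w b <;> simp [hnb]

lemma pv_evict (w : List String) (s : Nat) :
    ((pvNums w (s - 5) s).map pvCast).dropWhile (fun p => p.1 < (s : Int) - 4)
      = (pvNums w (s - 4) s).map pvCast := by
  have h1 : s - 4 = (s - 5) + ((s - 4) - (s - 5)) := by omega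
  have h2 : s - (s - 5) = ((s - 4) - (s - 5)) + (s - (s - 4)) := by omega
  have hsplit : pvNums w (s - 5) s = pvNums w (s - 5) (s - 4) ++ pvNums w (s - 4) s := by
    rw [pvNums, pvNums, pvNums, h2, ← List.range'_append_1, ← h1, List.filterMap_append]
  rw [hsplit, List.map_append, List.dropWhile_append]
  have hfst : ((pvNums w (s - 5) (s - 4)).map pvCast).dropWhile (fun p => p.1 < (s : Int) - 4) = [] := by
    rw [List.dropWhile_eq_nil_iff]
    intro x hx
    simp only [pvNums, List.mem_map, List.mem_filterMap, List.mem_range'_1] at hx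
    obtain ⟨⟨i, v⟩, ⟨i', ⟨hi1, hi2⟩, hi3⟩, rfl⟩ := hx
    have hii : i' = i := by
      cases hmm : pvNumAt w i' <;> rw [hmm] at hi3 <;> simp at hi3
      exact hi3.1
    subst hii
    simp only [pvCast, decide_eq_true_eq]
    omega
  rw [hfst]
  simp only [List.isEmpty_nil, if_true]
  cases hl : (pvNums w (s - 4) s).map pvCast with
  | nil => simp
  | cons x xs =>
    rw [List.dropWhile_cons]
    have hx : x ∈ (pvNums w (s - 4) s).map pvCast := by rw [hl]; exact List.mem_cons_self
    simp only [pvNums, List.mem_map, List.mem_filterMap, List.mem_range'_1] at hx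
    obtain ⟨⟨i, v⟩, ⟨i', ⟨hi1, hi2⟩, hi3⟩, rfl⟩ := hx
    have hii : i' = i := by
      cases hmm : pvNumAt w i' <;> rw [hmm] at hi3 <;> simp at hi3
      exact hi3.1
    subst hii
    have hnlt : ¬ ((pvCast (i', v)).1 < (s : Int) - 4) := by simp only [pvCast]; omega
    simp [hnlt]

lemma pv_outerA (w : List String) :
    ∀ (l : List String) (s : Nat), w.drop s = l →
      pvAOuter w (PySem.List.enumerate l (s : Int)) = pvSpecA w s := by
  intro l
  induction l with
  | nil =>
    intro s h
    have hle : w.length ≤ s := List.drop_eq_nil_iff.mp h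
    have h0 : w.length - s = 0 := by omega
    rw [pvSpecA, h0]
    simp [PySem.List.enumerate, pvAOuter]
  | cons t l' ih =>
    intro s h
    have hlt : s < w.length := by
      by_contra hs
      rw [List.drop_eq_nil_of_le (by omega)] at h
      exact (List.cons_ne_nil _ _) h.symm
    have hget : w[s]? = some t := by
      have h0 : (w.drop s)[0]? = some t := by rw [h]; rfl
      rw [List.getElem?_drop] at h0
      simpa using h0
    have hdrop' : w.drop (s + 1) = l' := by
      have h0 : (w.drop s).drop 1 = l' := by rw [h]; rfl
      rw [List.drop_drop] at h0; simpa [Nat.add_comm] using h0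
    have hcast : ((s : Int) + 1) = (((s + 1 : Nat)) : Int) := by push_cast; ring
    rw [PySem.List.enumerate_cons]
    have hnum : pvParseN t = pvNumAt w s := by rw [pvNumAt, hget]; rfl
    have hjs' : ∀ j ∈ pvNounRange w s, j < w.length := by
      intro j hj
      rw [pvNounRange, List.mem_range'_1] at hj
      omega
    cases hp : pvParseN t with
    | none =>
      have hP : pvP w s = false := by simp [pvP, ← hnum, hp]
      simp only [pvAOuter, hp]
      rw [hcast, ih (s + 1) hdrop', ← pv_specA_step w s hP]
    | some n =>
      simp only [pvAOuter, hp]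
      rw [pv_range_cast w s, pv_inner w n _ hjs']
      cases hf : (pvNounRange w s).find? (pvNounAt w) with
      | none =>
        have hP : pvP w s = false := by
          have hany : (pvNounRange w s).any (pvNounAt w) = false := by
            rw [← List.isSome_find?, hf]; rfl
          simp [pvP, hany]
        rw [hcast, ih (s + 1) hdrop', ← pv_specA_step w s hP]
        rfl
      | some j =>
        have hP : pvP w s = true := by
          have hany : (pvNounRange w s).any (pvNounAt w) = true := by
            rw [← List.isSome_find?, hf]; rfl
          simp [pvP, hany, ← hnum, hp]
        have hn1 : w.length - s = (w.length - (s + 1)) + 1 := by omega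
        rw [pvSpecA, hn1, List.range'_succ, List.find?_cons, hP]
        simp [← hnum, hp, hf]

lemma pv_loopB (w : List String) :
    ∀ (l : List String) (s : Nat), w.drop s = l →
      pvBLoop (PySem.List.enumerate l (s : Int)) ((pvNums w (s - 5) s).map pvCast) = pvSpecB w s := by
  intro l
  induction l with
  | nil =>
    intro s h
    have hle : w.length ≤ s := List.drop_eq_nil_iff.mp h
    have h0 : w.length - s = 0 := by omega
    rw [pvSpecB, h0]
    simp [PySem.List.enumerate, pvBLoop]
  | cons t l' ih =>
    intro s h
    have hlt : s < w.length := by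
      by_contra hs
      rw [List.drop_eq_nil_of_le (by omega)] at h
      exact (List.cons_ne_nil _ _) h.symm
    have hget : w[s]? = some t := by
      have h0 : (w.drop s)[0]? = some t := by rw [h]; rfl
      rw [List.getElem?_drop] at h0
      simpa using h0
    have hdrop' : w.drop (s + 1) = l' := by
      have h0 : (w.drop s).drop 1 = l' := by rw [h]; rfl
      rw [List.drop_drop] at h0; simpa [Nat.add_comm] using h0
    have hcast : ((s : Int) + 1) = (((s + 1 : Nat)) : Int) := by push_cast; ring
    have hnoun : PySem.Set.contains pvNouns t = pvNounAt w s := by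
      simp [pvNounAt, hget]
    have hnum : pvParseN t = pvNumAt w s := by rw [pvNumAt, hget]; rfl
    have hs5 : (s + 1) - 5 = s - 4 := rfl
    rw [PySem.List.enumerate_cons]
    simp only [pvBLoop]
    rw [pv_evict w s]
    have hcond : (PySem.Set.contains pvNouns t && !((pvNums w (s - 4) s).map pvCast).isEmpty)
        = pvQ w s := by
      rw [hnoun, pvQ, List.isEmpty_map]
    rw [hcond]
    cases hQ : pvQ w s with
    | true =>
      rw [if_pos rfl]
      have hn1 : w.length - s = (w.length - (s + 1)) + 1 := by omega
      rw [pvSpecB, hn1, List.range'_succ, List.find?_cons, hQ]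
      have hne : (pvNums w (s - 4) s) ≠ [] := by
        have hQ' := hQ
        rw [pvQ] at hQ'
        rcases Bool.and_eq_true_iff.mp hQ' with ⟨-, h2'⟩
        simpa using h2'
      cases hnums : pvNums w (s - 4) s with
      | nil => exact absurd hnums hne
      | cons p rest =>
        have hgd : w.getD s "" = t := by
          rw [List.getD_eq_getElem?_getD, hget]; rfl
        simp [hnums, pvCast, pvOut, hget]
    | false =>
      rw [if_neg (by simp)]
      cases hp : pvParseN t with
      | none =>
        have hnums1 : pvNums w (s - 4) (s + 1) = pvNums w (s - 4) s := by
          rw [pv_nums_snoc w (s - 4) s (by omega), ← hnum, hp]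
          simp
        have := ih (s + 1) hdrop'
        rw [hs5, hnums1] at this
        rw [hcast, this, ← pv_specB_step w s hQ]
      | some n =>
        have hnums1 : pvNums w (s - 4) (s + 1) = pvNums w (s - 4) s ++ [(s, n)] := by
          rw [pv_nums_snoc w (s - 4) s (by omega), ← hnum, hp]
          rfl
        have := ih (s + 1) hdrop'
        rw [hs5, hnums1, List.map_append] at this
        simp only [List.map_cons, List.map_nil] at this
        rw [show pvCast (s, n) = ((s : Int), n) from rfl] at this
        rw [hcast]
        exact this.trans (pv_specB_step w s hQ).symm

lemma pv_mem_nums (w : List String) (a b : Nat) (p : Nat × Int) (hp : p ∈ pvNums w a b) :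
    a ≤ p.1 ∧ p.1 < b ∧ pvNumAt w p.1 = some p.2 := by
  simp only [pvNums, List.mem_filterMap, List.mem_range'_1] at hp
  obtain ⟨i, ⟨hi1, hi2⟩, hi3⟩ := hp
  rcases Option.map_eq_some_iff.mp hi3 with ⟨v, hv, hev⟩
  cases hev
  exact ⟨hi1, by omega, hv⟩

lemma pv_nums_ne_nil (w : List String) (a b i : Nat) (h1 : a ≤ i) (h2 : i < b)
    (h3 : (pvNumAt w i).isSome) : pvNums w a b ≠ [] := by
  intro hnil
  rw [pvNums, List.filterMap_eq_nil_iff] at hnil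
  have hz := hnil i (by rw [List.mem_range'_1]; omega)
  cases hmm : pvNumAt w i <;> rw [hmm] at hz h3
  · simp at h3
  · simp at hz

lemma pv_spec_main (w : List String) : pvSpecA w 0 = pvSpecB w 0 := by
  rw [pvSpecA, pvSpecB]
  simp only [Nat.sub_zero]
  cases hA : (List.range' 0 w.length).find? (pvP w) with
  | none =>
    have hnoP := List.find?_eq_none.mp hA
    have hnoQ : (List.range' 0 w.length).find? (pvQ w) = none := by
      rw [List.find?_eq_none]
      intro j hj hQj
      rw [pvQ, Bool.and_eq_true] at hQj
      obtain ⟨hnoun, hne⟩ := hQj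
      have hjlen : j < w.length := pv_nounAt_lt w j hnoun
      obtain ⟨p, hp⟩ : ∃ p, p ∈ pvNums w (j - 4) j := by
        rcases hnums : pvNums w (j - 4) j with _ | ⟨p, rest⟩
        · rw [hnums] at hne; simp at hne
        · exact ⟨p, by simp⟩
      obtain ⟨hp1, hp2, hp3⟩ := pv_mem_nums w (j - 4) j p hp
      have hPi : pvP w p.1 = true := by
        rw [pvP, Bool.and_eq_true]
        refine ⟨by rw [hp3]; rfl, ?_⟩
        rw [List.any_eq_true]
        exact ⟨j, by rw [pvNounRange, List.mem_range'_1]; omega, hnoun⟩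
      exact hnoP p.1 (by rw [List.mem_range'_1]; omega) (by simp [hPi])
    rw [hnoQ]
    rfl
  | some istar =>
    obtain ⟨-, hilen, hPi, hImin⟩ := pv_find?_range' (pvP w) w.length 0 istar hA
    have hPi' := hPi
    rw [pvP, Bool.and_eq_true] at hPi'
    obtain ⟨hnum_i, hany⟩ := hPi'
    obtain ⟨nstar, hn⟩ := Option.isSome_iff_exists.mp hnum_i
    obtain ⟨j1, hj1⟩ : ∃ j1, (pvNounRange w istar).find? (pvNounAt w) = some j1 := by
      rw [← Option.isSome_iff_exists, List.isSome_find?]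
      exact hany
    obtain ⟨hj1a, hj1b', hj1noun, hj1min⟩ :=
      pv_find?_range' (pvNounAt w) (min w.length (istar + 5) - (istar + 1)) (istar + 1) j1
        (by rw [← pvNounRange]; exact hj1)
    have hj1b : j1 < min w.length (istar + 5) := by omega
    -- the first qualifying noun position jstar exists
    have hQj1 : pvQ w j1 = true := by
      rw [pvQ, Bool.and_eq_true]
      refine ⟨hj1noun, ?_⟩
      have := pv_nums_ne_nil w (j1 - 4) j1 istar (by omega) (by omega) hnum_i
      simpa using this
    obtain ⟨jstar, hjstar⟩ : ∃ j, (List.range' 0 w.length).find? (pvQ w) = some j := by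
      rw [← Option.isSome_iff_exists, List.isSome_find?, List.any_eq_true]
      exact ⟨j1, by rw [List.mem_range'_1]; omega, hQj1⟩
    obtain ⟨-, hjslen, hQjs, hQmin⟩ := pv_find?_range' (pvQ w) w.length 0 jstar hjstar
    have hjsle : jstar ≤ j1 := by
      by_contra hlt
      exact absurd hQj1 (by simp [hQmin j1 (by omega) (by omega)])
    have hQjs' := hQjs
    rw [pvQ, Bool.and_eq_true] at hQjs'
    obtain ⟨hnounjs, hnejs⟩ := hQjs'
    -- the first number in jstar's look-back window
    have hh : (pvNums w (jstar - 4) jstar).head?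
        = ((List.range' (jstar - 4) (jstar - (jstar - 4))).find?
            (fun i => ((pvNumAt w i).map (fun v => (i, v))).isSome)).bind
            (fun i => (pvNumAt w i).map (fun v => (i, v))) :=
      pv_head?_filterMap _ _
    have hpred : (fun i => ((pvNumAt w i).map (fun v => (i, v))).isSome)
        = (fun i => (pvNumAt w i).isSome) := by
      funext i; rw [Option.isSome_map]
    rw [hpred] at hh
    obtain ⟨i0, hi0⟩ : ∃ i0,
        (List.range' (jstar - 4) (jstar - (jstar - 4))).find? (fun i => (pvNumAt w i).isSome)
          = some i0 := by
      rw [← Option.isSome_iff_exists, List.isSome_find?]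
      rcases hnums : pvNums w (jstar - 4) jstar with _ | ⟨p, rest⟩
      · exact absurd hnums (by simpa using hnejs)
      · obtain ⟨hp1, hp2, hp3⟩ := pv_mem_nums w (jstar - 4) jstar p (by rw [hnums]; exact List.mem_cons_self)
        rw [List.any_eq_true]
        exact ⟨p.1, by rw [List.mem_range'_1]; omega, by rw [hp3]; rfl⟩
    obtain ⟨hi0a, hi0b', hi0some, hi0min⟩ :=
      pv_find?_range' (fun i => (pvNumAt w i).isSome) (jstar - (jstar - 4)) (jstar - 4) i0 hi0
    have hi0b : i0 < jstar := by omega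
    -- istar ≤ i0 since i0 satisfies pvP
    have hPi0 : pvP w i0 = true := by
      rw [pvP, Bool.and_eq_true]
      refine ⟨hi0some, ?_⟩
      rw [List.any_eq_true]
      exact ⟨jstar, by rw [pvNounRange, List.mem_range'_1]; omega, hnounjs⟩
    have hii0 : istar ≤ i0 := by
      by_contra hlt
      exact absurd hPi0 (by simp [hImin i0 (by omega) (by omega)])
    -- istar lies in jstar's look-back window, hence i0 = istar
    have histar_lb : jstar ≤ istar + 4 := by omega
    have hi0eq : i0 = istar := by
      rcases Nat.eq_or_lt_of_le hii0 with h | h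
      · exact h.symm
      · exact absurd hnum_i (by simp [hi0min istar (by omega) h])
    -- jstar lies in istar's look-ahead window, hence j1 = jstar
    have hj1le : j1 ≤ jstar := by
      by_contra hlt
      exact absurd hnounjs (by simp [hj1min jstar (by omega) (by omega)])
    have hjeq : jstar = j1 := by omega
    -- assemble
    rw [hjstar]
    simp only [Option.bind_some]
    rw [hn, hj1, hh, hi0]
    simp only [Option.bind_some, hi0eq, hn, Option.map_some]
    rw [hjeq]


-- ===== VERDICT (by name: the statement is the Claim_ definition above) =====
theorem extract_title_text_py_spec : Claim_equal_extract_title_text_py := by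
  intro tokens _
  unfold Spec_extract_title_text_py extract_title_text_py extract_title_text_py_alt
  set w := (PySem.List.slice tokens none (some 12)).filter (fun t => !(t == "")) with hw
  have hA : pvAOuter w (PySem.List.enumerate w 0) = pvSpecA w 0 := by
    have := pv_outerA w w 0 (by simp)
    simpa using this
  have hB : pvBLoop (PySem.List.enumerate w 0) [] = pvSpecB w 0 := by
    have := pv_loopB w w 0 (by simp)
    simpa [pvNums] using this
  by_cases hnil : w = []
  · simp [hnil, pvBLoop]
  · simp only [hnil, if_false]
    rw [hA, hB, pv_spec_main]
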